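-- pv_equiv track=rewrite | github.com/springin98/Algorithm | 프로그래머스/lv0/120861. 캐릭터의 좌표/캐릭터의 좌표.py | solution
-- ===== SOURCE A (Python) =====
-- def solution(keyinput, board):
--     dir = {'up': [0, 1], 'down': [0, -1], 'left': [-1, 0], 'right': [1, 0]}
--     result = [0, 0]
--     for i in keyinput :
--             result[0] += dir[i][0]
--             result[1] += dir[i][1]
--             if board[0]//2 < abs(result[0]) :
--                 result[0] -= dir[i][0]
--             if board[1]//2 < abs(result[1]) :
--                 result[1] -= dir[i][1]
--
--     return result
-- ===== SOURCE B (Python) =====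
-- def solution(keyinput, board):
--     half_x = board[0] // 2
--     half_y = board[1] // 2
--     x = 0
--     for k in keyinput:
--         nx = x + (k == 'right') - (k == 'left')
--         if abs(nx) <= half_x:
--             x = nx
--     y = 0
--     for k in keyinput:
--         ny = y + (k == 'up') - (k == 'down')
--         if abs(ny) <= half_y:
--             y = ny
--     return [x, y]
-- ===== Notes on version B (the rewrite author's own statement) =====
-- stated objective: simpler
-- what changed: Single interleaved pass over a direction dict with undo branches is replaced by two independent per-axis passes (x from left/right, y from up/down), each a plain bounded walk that only steps when the step stays on the board.
-- outside the precondition, e.g. on solution([], []): A returns [0, 0], B raises IndexError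
import Mathlib
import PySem

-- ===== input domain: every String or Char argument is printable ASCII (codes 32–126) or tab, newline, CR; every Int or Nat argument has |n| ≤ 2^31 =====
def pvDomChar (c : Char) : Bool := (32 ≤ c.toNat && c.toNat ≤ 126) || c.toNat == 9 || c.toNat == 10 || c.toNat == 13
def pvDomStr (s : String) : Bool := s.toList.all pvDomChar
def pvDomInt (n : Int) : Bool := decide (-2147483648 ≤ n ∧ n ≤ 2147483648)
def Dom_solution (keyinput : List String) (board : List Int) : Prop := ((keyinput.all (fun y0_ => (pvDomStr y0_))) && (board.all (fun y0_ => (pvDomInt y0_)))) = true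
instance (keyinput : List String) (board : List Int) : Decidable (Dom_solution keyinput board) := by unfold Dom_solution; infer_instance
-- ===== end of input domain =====

-- B replaces A's single interleaved dict-driven pass (step then undo) by two independent
-- per-axis bounded-walk passes; same return value on Pre_, no speed claim.

-- ===== PORT A =====
-- the literal dict {'up':[0,1],'down':[0,-1],'left':[-1,0],'right':[1,0]}; the 2-lists are
-- ported as pairs; none = KeyError on any other key
def dirGet (s : String) : Option (Int × Int) :=
  if s = "up" then some (0, 1)
  else if s = "down" then some (0, -1)
  else if s = "left" then some (-1, 0)
  else if s = "right" then some (1, 0)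
  else none

-- one loop-body iteration of A; none = the exception A raises there (KeyError/IndexError)
def stepA (board : List Int) (r : Int × Int) (k : String) : Option (Int × Int) :=
  match dirGet k with
  | none => none
  | some d =>
    let x := r.1 + d.1
    let y := r.2 + d.2
    match PySem.List.pyGet? board 0 with
    | none => none
    | some b0 =>
      let x := if PySem.Int.floordiv b0 2 < |x| then x - d.1 else x
      match PySem.List.pyGet? board 1 with
      | none => none
      | some b1 =>
        let y := if PySem.Int.floordiv b1 2 < |y| then y - d.2 else y
        some (x, y)

def solution (keyinput : List String) (board : List Int) : List Int :=
  match keyinput.foldl (fun acc k => acc.bind (fun r => stepA board r k)) (some ((0 : Int), (0 : Int))) with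
  | some r => [r.1, r.2]
  | none => []   -- A raised; outside Pre_

-- ===== PORT B =====
def stepX (hx : Int) (x : Int) (k : String) : Int :=
  let nx := x + (if k = "right" then 1 else 0) - (if k = "left" then 1 else 0)
  if |nx| ≤ hx then nx else x

def stepY (hy : Int) (y : Int) (k : String) : Int :=
  let ny := y + (if k = "up" then 1 else 0) - (if k = "down" then 1 else 0)
  if |ny| ≤ hy then ny else y

def solution_alt (keyinput : List String) (board : List Int) : List Int :=
  match PySem.List.pyGet? board 0, PySem.List.pyGet? board 1 with
  | some b0, some b1 =>
    let hx := PySem.Int.floordiv b0 2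
    let hy := PySem.Int.floordiv b1 2
    let x := keyinput.foldl (stepX hx) 0
    let y := keyinput.foldl (stepY hy) 0
    [x, y]
  | _, _ => []   -- B raised IndexError; outside Pre_

-- ===== PRECONDITION & SPEC =====
-- Pre_ excludes (i) keyinput containing any string other than the four keys (A raises KeyError)
-- and (ii) boards with fewer than 2 entries: there A raises IndexError on the first key, and
-- returns [0,0] only by accident when keyinput is empty (the loop never touches board), while
-- B reads board[0] up front and raises.
def Pre_solution (keyinput : List String) (board : List Int) : Prop :=
  (∀ k ∈ keyinput, k = "up" ∨ k = "down" ∨ k = "left" ∨ k = "right") ∧ 2 ≤ board.length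
instance (keyinput : List String) (board : List Int) : Decidable (Pre_solution keyinput board) := by
  unfold Pre_solution; infer_instance

def pvWitness_solution : List String × List Int := (["right", "up", "left", "down"], [5, 3])

def Spec_solution (keyinput : List String) (board : List Int) (out : List Int) : Prop := out = solution_alt keyinput board
instance (keyinput : List String) (board : List Int) (out : List Int) : Decidable (Spec_solution keyinput board out) := by unfold Spec_solution; infer_instance

-- ===== CLAIM (what is proved, stated in full; the proofs are below) =====
def Claim_equal_solution : Prop := ∀ (keyinput : List String) (board : List Int), Dom_solution keyinput board → Pre_solution keyinput board → Spec_solution keyinput board (solution keyinput board)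

-- ===== LEMMAS AND PROOFS =====

-- per-step clamp arithmetic: "add d then undo if out of bounds" = "take the step only if it stays in bounds"
theorem clampA (h v d : Int) : (if h < |v + d| then v + d - d else v + d) = if |v + d| ≤ h then v + d else v := by
  rcases abs_cases (v + d) with ⟨e, _⟩ | ⟨e, _⟩ <;> rw [e] <;> split_ifs <;> omega

-- one loop-body iteration of A equals the pair of B's axis steps (valid key, board readable)
theorem stepA_eq (board : List Int) (b0 b1 : Int)
    (h0 : PySem.List.pyGet? board 0 = some b0) (h1 : PySem.List.pyGet? board 1 = some b1)
    (x y : Int) (k : String) (hkk : k = "up" ∨ k = "down" ∨ k = "left" ∨ k = "right") :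
    stepA board (x, y) k =
      some (stepX (PySem.Int.floordiv b0 2) x k, stepY (PySem.Int.floordiv b1 2) y k) := by
  rcases hkk with h | h | h | h <;> subst h <;>
    simp only [stepA, dirGet, h0, h1, stepX, stepY, String.reduceEq, if_true, if_false,
      add_zero, sub_zero, Prod.mk.injEq, Option.some.injEq] <;>
    refine ⟨?_, ?_⟩ <;>
    first
      | (split_ifs <;> omega)
      | exact clampA _ _ 1
      | (rw [show ∀ v : Int, v - 1 = v + (-1) from fun v => by ring]; exact clampA _ _ (-1))

-- the joint invariant: A's interleaved fold equals the pair of B's two axis folds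
theorem foldA_eq_pair (b0 b1 : Int) (board : List Int)
    (h0 : PySem.List.pyGet? board 0 = some b0) (h1 : PySem.List.pyGet? board 1 = some b1)
    (keys : List String) (hk : ∀ k ∈ keys, k = "up" ∨ k = "down" ∨ k = "left" ∨ k = "right") :
    ∀ x y : Int,
      keys.foldl (fun acc k => acc.bind (fun r => stepA board r k)) (some (x, y)) =
        some (keys.foldl (stepX (PySem.Int.floordiv b0 2)) x,
              keys.foldl (stepY (PySem.Int.floordiv b1 2)) y) := by
  induction keys with
  | nil => intro x y; rfl
  | cons k ks ih =>
    intro x y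
    have hks : ∀ k ∈ ks, k = "up" ∨ k = "down" ∨ k = "left" ∨ k = "right" := by
      intro k' hk'; exact hk k' (by simp [hk'])
    simp only [List.foldl_cons, Option.bind_some]
    rw [stepA_eq board b0 b1 h0 h1 x y k (hk k (by simp)), ih hks]

-- ===== VERDICT (by name: the statement is the Claim_ definition above) =====
theorem solution_spec : Claim_equal_solution := by
  intro keyinput board _ hpre
  obtain ⟨hk, hlen⟩ := hpre
  match board, hlen with
  | b0 :: b1 :: rest, _ =>
    have h0 : PySem.List.pyGet? (b0 :: b1 :: rest) 0 = some b0 := by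
      simp [PySem.List.pyGet?_zero]
    have h1 : PySem.List.pyGet? (b0 :: b1 :: rest) 1 = some b1 := by
      have := PySem.List.pyGet?_ofNat (xs := b0 :: b1 :: rest) (n := 1) (by simp)
      simpa using this
    unfold Spec_solution solution solution_alt
    rw [foldA_eq_pair b0 b1 _ h0 h1 keyinput hk 0 0, h0, h1]
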